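-- pv_equiv track=rewrite | github.com/yueeong/rs | q4/q4.py | string_compactor
-- ===== SOURCE A (Python) =====
-- def string_compactor(string_to_manipulate):
--     string_to_manipulate = list(string_to_manipulate.replace(' ', ''))
--
--     for each in range(len(string_to_manipulate)):
--         try:
--             if string_to_manipulate[each] == string_to_manipulate[each + 1]:
--                 del string_to_manipulate[each]
--         except IndexError:
--             break
--     return ''.join(string_to_manipulate)
-- ===== SOURCE B (Python) =====
-- def string_compactor(string_to_manipulate):
--     t = string_to_manipulate.replace(' ', '')
--     out = []
--     i = 0
--     n = len(t)
--     while i < n: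
--         if i + 1 < n and t[i] == t[i + 1]:
--             out.append(t[i + 1])
--             i += 2
--         else:
--             out.append(t[i])
--             i += 1
--     return ''.join(out)
-- ===== Notes on version B (the rewrite author's own statement) =====
-- stated objective: faster
-- what changed: Replaced the quadratic mutate-while-iterating loop (O(n) del inside a scan over a shrinking list) by a single forward pass over the immutable despaced string that appends kept characters and advances the index by 2 when a duplicate pair is dropped.
import Mathlib
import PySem

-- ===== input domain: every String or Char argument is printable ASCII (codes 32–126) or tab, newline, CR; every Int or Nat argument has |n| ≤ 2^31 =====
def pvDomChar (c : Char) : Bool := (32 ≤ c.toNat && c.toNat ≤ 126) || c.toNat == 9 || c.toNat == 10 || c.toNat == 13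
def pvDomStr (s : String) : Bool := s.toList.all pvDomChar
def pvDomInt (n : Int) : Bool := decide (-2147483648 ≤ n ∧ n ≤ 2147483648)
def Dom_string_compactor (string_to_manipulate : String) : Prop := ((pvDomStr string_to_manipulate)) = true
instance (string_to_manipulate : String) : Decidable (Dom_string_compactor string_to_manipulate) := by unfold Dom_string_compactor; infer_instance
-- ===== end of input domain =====

-- B replaces A's quadratic del-inside-scan by one forward pass over the despaced string (objective: faster).

-- ===== PORT A =====
-- the for-each loop over range(n): each iteration reads l[each] and l[each+1]
-- (an IndexError on either breaks the loop), deletes at `each` if they are equal,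
-- and moves to each+1; `fuel` is the remaining iterations of range(len(...)).
def stringCompactorLoopA (l : List Char) (each : Nat) (fuel : Nat) : List Char :=
  match fuel with
  | 0 => l
  | fuel + 1 =>
    match l[each]?, l[each + 1]? with
    | some a, some b =>
        stringCompactorLoopA (if a == b then l.eraseIdx each else l) (each + 1) fuel
    | _, _ => l   -- IndexError → break

def string_compactor (string_to_manipulate : String) : String :=
  let l := (PySem.Str.replace string_to_manipulate " " "").toList
  String.ofList (stringCompactorLoopA l 0 l.length)

-- ===== PORT B =====
-- Source B's while-loop: i advances by 2 appending t[i+1] when t[i] == t[i+1],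
-- else by 1 appending t[i]; written as the equivalent recursion on the suffix t[i:].
def stringCompactorLoopB (t : List Char) : List Char :=
  match t with
  | [] => []
  | [a] => [a]
  | a :: b :: rest =>
      if a == b then b :: stringCompactorLoopB rest
      else a :: stringCompactorLoopB (b :: rest)
termination_by t.length

def string_compactor_alt (string_to_manipulate : String) : String :=
  String.ofList (stringCompactorLoopB (PySem.Str.replace string_to_manipulate " " "").toList)

-- ===== PRECONDITION & SPEC =====
def Spec_string_compactor (string_to_manipulate : String) (out : String) : Prop := out = string_compactor_alt string_to_manipulate
instance (string_to_manipulate : String) (out : String) : Decidable (Spec_string_compactor string_to_manipulate out) := by unfold Spec_string_compactor; infer_instance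

-- ===== CLAIM (what is proved, stated in full; the proofs are below) =====
def Claim_equal_string_compactor : Prop := ∀ (string_to_manipulate : String), Dom_string_compactor string_to_manipulate → Spec_string_compactor string_to_manipulate (string_compactor string_to_manipulate)

-- ===== LEMMAS AND PROOFS =====

-- take / drop of s ++ x :: t at index |s| + 1
theorem take_append_one (s : List Char) (x : Char) (t : List Char) :
    (s ++ x :: t).take (s.length + 1) = s ++ [x] := by
  induction s with
  | nil => rfl
  | cons c s ih => simpa using ih

theorem drop_append_one (s : List Char) (x : Char) (t : List Char) :
    (s ++ x :: t).drop (s.length + 1) = t := by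
  induction s with
  | nil => rfl
  | cons c s ih => simp [ih]

-- getElem? through drop, in applied form
theorem getElem?_drop_aux (l : List Char) (n k : Nat) : (l.drop n)[k]? = l[n + k]? :=
  List.getElem?_drop

-- B's pass is the identity on lists of length ≤ 1
theorem stringCompactorLoopB_short (t : List Char) (h : t.length ≤ 1) :
    stringCompactorLoopB t = t := by
  match t with
  | [] => simp [stringCompactorLoopB]
  | [a] => simp [stringCompactorLoopB]
  | a :: b :: rest => simp at h

-- Invariant of A's loop: with enough fuel, the state (l, each) yields the untouched
-- prefix l.take each followed by B's pass over the suffix l.drop each.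
theorem stringCompactorLoopA_eq (fuel : Nat) :
    ∀ (l : List Char) (each : Nat), l.length ≤ each + 1 + fuel →
      stringCompactorLoopA l each fuel = l.take each ++ stringCompactorLoopB (l.drop each) := by
  induction fuel with
  | zero =>
    intro l each h
    have hshort : (l.drop each).length ≤ 1 := by
      simp only [List.length_drop]; omega
    unfold stringCompactorLoopA
    rw [stringCompactorLoopB_short (l.drop each) hshort, List.take_append_drop]
  | succ fuel ih =>
    intro l each h
    unfold stringCompactorLoopA
    rcases hld : l.drop each with _ | ⟨a, tl⟩
    · -- l.drop each = [] : l[each]? = none → break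
      have ha : l[each]? = none := by
        have h0 := getElem?_drop_aux l each 0
        rw [hld] at h0; simpa using h0.symm
      have hb : l[each + 1]? = none := by
        have h1 := getElem?_drop_aux l each 1
        rw [hld] at h1; simpa using h1.symm
      rw [ha, hb]
      show l = l.take each ++ stringCompactorLoopB []
      have hle : l.length ≤ each := by
        have := congrArg List.length hld
        simp only [List.length_drop, List.length_nil] at this
        omega
      rw [stringCompactorLoopB_short [] (by simp), List.take_of_length_le hle, List.append_nil]
    · rcases htl : tl with _ | ⟨b, rest⟩
      · -- l.drop each = [a] : l[each+1]? = none → break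
        subst htl
        have ha : l[each]? = some a := by
          have h0 := getElem?_drop_aux l each 0
          rw [hld] at h0; simpa using h0.symm
        have hb : l[each + 1]? = none := by
          have h1 := getElem?_drop_aux l each 1
          rw [hld] at h1; simpa using h1.symm
        rw [ha, hb]
        show l = l.take each ++ stringCompactorLoopB [a]
        rw [stringCompactorLoopB_short [a] (by simp)]
        conv_lhs => rw [← List.take_append_drop each l, hld]
      · -- l.drop each = a :: b :: rest
        subst htl
        have ha : l[each]? = some a := by
          have h0 := getElem?_drop_aux l each 0
          rw [hld] at h0; simpa using h0.symm
        have hb : l[each + 1]? = some b := by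
          have h1 := getElem?_drop_aux l each 1
          rw [hld] at h1; simpa using h1.symm
        have hlen : l.length = each + (2 + rest.length) := by
          have := congrArg List.length hld
          simp only [List.length_drop, List.length_cons] at this
          omega
        have htke : (l.take each).length = each := by
          simp [List.length_take]; omega
        rw [ha, hb]
        show stringCompactorLoopA (if (a == b) = true then l.eraseIdx each else l) (each + 1) fuel
              = l.take each ++ stringCompactorLoopB (a :: b :: rest)
        by_cases hab : a = b
        · rw [if_pos (by simp [hab])]
          have herase : l.eraseIdx each = l.take each ++ (b :: rest) := by
            rw [List.eraseIdx_eq_take_drop_succ]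
            congr 1
            rw [← List.drop_drop, hld]
            rfl
          rw [herase]
          have hlen2 : (l.take each ++ (b :: rest)).length ≤ (each + 1) + 1 + fuel := by
            simp only [List.length_append, List.length_cons, htke]
            omega
          rw [ih _ _ hlen2]
          have htk := take_append_one (l.take each) b rest
          have hdr := drop_append_one (l.take each) b rest
          rw [htke] at htk hdr
          rw [htk, hdr]
          rw [show stringCompactorLoopB (a :: b :: rest)
                = if a == b then b :: stringCompactorLoopB rest
                  else a :: stringCompactorLoopB (b :: rest) from by rw [stringCompactorLoopB]]
          simp [hab]
        · rw [if_neg (by simp [hab])]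
          rw [ih _ _ (by omega)]
          have hdr1 : l.drop (each + 1) = b :: rest := by
            rw [← List.drop_drop, hld]
            rfl
          have htk1 : l.take (each + 1) = l.take each ++ [a] := by
            rw [List.take_add_one, ha]
            rfl
          rw [hdr1, htk1]
          rw [show stringCompactorLoopB (a :: b :: rest)
                = if a == b then b :: stringCompactorLoopB rest
                  else a :: stringCompactorLoopB (b :: rest) from by rw [stringCompactorLoopB]]
          simp [hab]

-- ===== VERDICT (by name: the statement is the Claim_ definition above) =====
theorem string_compactor_spec : Claim_equal_string_compactor := by
  intro s _
  unfold Spec_string_compactor string_compactor string_compactor_alt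
  simp only
  rw [stringCompactorLoopA_eq _ _ 0 (by omega)]
  simp
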